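-- pv_equiv track=rewrite | github.com/BobbyGoop/pyameslib | src/utils/common.py | convert_kwargs
-- ===== SOURCE A (Python) =====
-- import itertools
-- from typing import Dict, List, Callable
--
-- def convert_kwargs(kwargs: Dict) -> List:
--     keys = []
--     # ensure keys start with '--' for asp scripts
--     for key in kwargs.keys():
--         if not isinstance(key, str):
--             raise ValueError('Shell command must be string, starting with `-` or `--`')
--         if key not in ("--t_srs", "--t_projwin"):
--             key = key.replace("_", "-")
--         if not key.startswith("--") and len(key) > 1:
--             keys.append(f"--{key}")
--         elif not key.startswith("-"):
--             keys.append(f"-{key}")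
--         else:
--             keys.append(key)
--
--     # Also convert key values to string
--     return [
--         x
--         for x in itertools.chain.from_iterable(
--             itertools.zip_longest(keys, map(str, kwargs.values()))
--         )
--         if x is not None
--     ]
-- ===== SOURCE B (Python) =====
-- def convert_kwargs(kwargs):
--     result = []
--     for key, value in kwargs.items():
--         result.append(_normalize_key(key))
--         result.append(str(value))
--     return result
--
--
-- def _normalize_key(key):
--     if not isinstance(key, str):
--         raise ValueError('Shell command must be string, starting with `-` or `--`')
--     if key not in ("--t_srs", "--t_projwin"):
--         key = key.replace("_", "-")
--     if not key.startswith("--") and len(key) > 1: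
--         return f"--{key}"
--     elif not key.startswith("-"):
--         return f"-{key}"
--     return key
-- ===== Notes on version B (the rewrite author's own statement) =====
-- stated objective: simpler
-- what changed: Single pass over kwargs.items() appending the normalized key and str(value) directly, replacing A's two-stage build (separate keys list, then itertools.zip_longest + chain.from_iterable interleave with a None filter).
import Mathlib
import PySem

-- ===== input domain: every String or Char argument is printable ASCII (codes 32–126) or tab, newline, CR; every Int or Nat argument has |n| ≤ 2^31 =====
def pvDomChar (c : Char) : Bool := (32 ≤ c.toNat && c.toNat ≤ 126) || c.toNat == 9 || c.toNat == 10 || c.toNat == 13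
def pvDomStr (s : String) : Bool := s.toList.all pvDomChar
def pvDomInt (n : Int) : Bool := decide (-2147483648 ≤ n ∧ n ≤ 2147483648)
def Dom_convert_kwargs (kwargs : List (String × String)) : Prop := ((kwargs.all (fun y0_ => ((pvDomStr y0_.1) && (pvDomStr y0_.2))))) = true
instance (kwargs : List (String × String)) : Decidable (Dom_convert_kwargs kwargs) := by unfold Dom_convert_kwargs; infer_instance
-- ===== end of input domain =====

-- B fuses A's two passes (keys list, then zip_longest/chain interleave) into one loop; objective: simpler.

-- ===== PORT A =====
-- itertools.zip_longest on two lists of strings (fill value None)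
def pvZipLongest : List String → List String → List (Option String × Option String)
  | [], [] => []
  | [], b :: bs => (none, some b) :: pvZipLongest [] bs
  | a :: as, [] => (some a, none) :: pvZipLongest as []
  | a :: as, b :: bs => (some a, some b) :: pvZipLongest as bs

def convert_kwargs (kwargs : List (String × String)) : List String :=
  -- for key in kwargs.keys(): normalize and append (isinstance check cannot fail: keys are String)
  let keys : List String := kwargs.foldl (fun acc p =>
    let key := p.1
    let key := if key = "--t_srs" ∨ key = "--t_projwin" then key
               else PySem.Str.replace key "_" "-"
    if PySem.Str.startswith key "--" = false ∧ PySem.Str.len key > 1 then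
      acc ++ ["--" ++ key]
    else if PySem.Str.startswith key "-" = false then
      acc ++ ["-" ++ key]
    else
      acc ++ [key]) []
  -- [x for x in chain.from_iterable(zip_longest(keys, map(str, kwargs.values()))) if x is not None]
  ((pvZipLongest keys (kwargs.map (fun p => p.2))).flatMap
      (fun q => [q.1, q.2])).filterMap id

-- ===== PORT B =====
def pvNormalizeKey (key : String) : String :=
  let key := if key = "--t_srs" ∨ key = "--t_projwin" then key
             else PySem.Str.replace key "_" "-"
  if PySem.Str.startswith key "--" = false ∧ PySem.Str.len key > 1 then
    "--" ++ key
  else if PySem.Str.startswith key "-" = false then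
    "-" ++ key
  else
    key

def convert_kwargs_alt : List (String × String) → List String
  | [] => []
  | (key, value) :: rest => pvNormalizeKey key :: value :: convert_kwargs_alt rest

-- ===== PRECONDITION & SPEC =====
def Spec_convert_kwargs (kwargs : List (String × String)) (out : List String) : Prop := out = convert_kwargs_alt kwargs
instance (kwargs : List (String × String)) (out : List String) : Decidable (Spec_convert_kwargs kwargs out) := by unfold Spec_convert_kwargs; infer_instance

-- ===== CLAIM (what is proved, stated in full; the proofs are below) =====
def Claim_equal_convert_kwargs : Prop := ∀ (kwargs : List (String × String)), Dom_convert_kwargs kwargs → Spec_convert_kwargs kwargs (convert_kwargs kwargs)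

-- ===== LEMMAS AND PROOFS =====

-- A's foldl over the keys, started from any accumulator, is that accumulator followed by
-- the normalized keys (A's per-element branches equal pvNormalizeKey definitionally).
theorem keysA_eq (kwargs : List (String × String)) (acc : List String) :
    kwargs.foldl (fun acc p =>
      let key := p.1
      let key := if key = "--t_srs" ∨ key = "--t_projwin" then key
                 else PySem.Str.replace key "_" "-"
      if PySem.Str.startswith key "--" = false ∧ PySem.Str.len key > 1 then
        acc ++ ["--" ++ key]
      else if PySem.Str.startswith key "-" = false then
        acc ++ ["-" ++ key]
      else
        acc ++ [key]) acc
    = acc ++ kwargs.map (fun p => pvNormalizeKey p.1) := by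
  induction kwargs generalizing acc with
  | nil => simp
  | cons hd tl ih =>
    simp only [List.foldl_cons]
    have hnorm : ∀ (a : List String),
        (let key := hd.1
         let key := if key = "--t_srs" ∨ key = "--t_projwin" then key
                    else PySem.Str.replace key "_" "-"
         if PySem.Str.startswith key "--" = false ∧ PySem.Str.len key > 1 then
           a ++ ["--" ++ key]
         else if PySem.Str.startswith key "-" = false then
           a ++ ["-" ++ key]
         else
           a ++ [key]) = a ++ [pvNormalizeKey hd.1] := by
      intro a
      simp only [pvNormalizeKey, apply_ite (fun s : String => a ++ [s])]
    rw [hnorm, ih]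
    simp

-- Interleaving two equal-length lists with zip_longest, flattening and dropping the
-- (absent) Nones yields the alternating list.
theorem zipLongest_interleave : ∀ (ks vs : List String), ks.length = vs.length →
    ((pvZipLongest ks vs).flatMap (fun q => [q.1, q.2])).filterMap id
      = (ks.zip vs).flatMap (fun p => [p.1, p.2]) := by
  intro ks
  induction ks with
  | nil => intro vs h; cases vs <;> simp_all [pvZipLongest]
  | cons k ks ih =>
    intro vs h
    cases vs with
    | nil => simp at h
    | cons v vs =>
      simp only [pvZipLongest, List.flatMap_cons, List.filterMap_append, List.zip_cons_cons]
      rw [ih vs (by simpa using h)]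
      rfl

theorem alt_eq_zip_flatMap (kwargs : List (String × String)) :
    convert_kwargs_alt kwargs
      = ((kwargs.map (fun p => pvNormalizeKey p.1)).zip (kwargs.map (fun p => p.2))).flatMap
          (fun p => [p.1, p.2]) := by
  induction kwargs with
  | nil => rfl
  | cons hd tl ih =>
    cases hd
    simp only [convert_kwargs_alt, List.map_cons, List.zip_cons_cons, List.flatMap_cons, ih]
    rfl

-- ===== VERDICT (by name: the statement is the Claim_ definition above) =====
theorem convert_kwargs_spec : Claim_equal_convert_kwargs := by
  intro kwargs _
  simp only [Spec_convert_kwargs, convert_kwargs]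
  rw [keysA_eq kwargs [], List.nil_append]
  rw [zipLongest_interleave _ _ (by simp), alt_eq_zip_flatMap]
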